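-- pv_equiv track=rewrite | github.com/opusberedugo/agric-recommendation | prepare_data.py | infer_task_id_from_path
-- ===== SOURCE A (Python) =====
-- def infer_task_id_from_path(file_path):
--     """Infer task ID from file path"""
--     file_path = file_path.lower()
--
--     if any(term in file_path for term in ['crop_recommendation', 'crop_recommend']):
--         return 0  # Crop recommendation
--     elif any(term in file_path for term in ['fertilizer', 'fert']):
--         return 1  # Fertilizer recommendation
--     elif any(term in file_path for term in ['climate', 'weather']):
--         return 2  # Climate effect prediction
--     elif any(term in file_path for term in ['yield', 'production']):
--         return 3  # Yield prediction
--
--     # Default to crop recommendation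
--     return 0
-- ===== SOURCE B (Python) =====
-- _KEYWORD_IDS = {
--     'crop_recommendation': 0, 'crop_recommend': 0,
--     'fertilizer': 1, 'fert': 1,
--     'climate': 2, 'weather': 2,
--     'yield': 3, 'production': 3,
-- }
--
-- def infer_task_id_from_path(file_path):
--     """Infer task ID from file path: collect ALL matching keyword ids, return the smallest."""
--     p = file_path.lower()
--     hits = [tid for kw, tid in _KEYWORD_IDS.items() if kw in p]
--     return min(hits, default=0)
-- ===== Notes on version B (the rewrite author's own statement) =====
-- stated objective: alternative
-- what changed: Instead of a first-match if-elif chain, B collects the ids of ALL keywords occurring in the path and returns their minimum (default 0); precedence-by-order becomes minimum-over-matches.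
import Mathlib
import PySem

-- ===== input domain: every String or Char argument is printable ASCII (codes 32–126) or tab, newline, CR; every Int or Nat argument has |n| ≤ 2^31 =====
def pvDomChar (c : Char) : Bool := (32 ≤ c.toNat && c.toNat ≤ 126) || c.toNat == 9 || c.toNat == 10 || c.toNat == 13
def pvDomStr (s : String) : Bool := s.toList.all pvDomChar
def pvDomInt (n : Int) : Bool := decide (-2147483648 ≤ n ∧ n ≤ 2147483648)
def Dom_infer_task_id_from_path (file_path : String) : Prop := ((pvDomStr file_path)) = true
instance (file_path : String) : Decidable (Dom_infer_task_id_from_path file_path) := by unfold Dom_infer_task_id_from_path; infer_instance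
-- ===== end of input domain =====

-- B replaces A's first-match if-elif chain by collecting ALL matching keyword ids and taking their minimum (alternative; same cost).

-- ===== PORT A =====
def infer_task_id_from_path (file_path : String) : Int :=
  let file_path := PySem.Str.lower file_path
  if ["crop_recommendation", "crop_recommend"].any (fun term => PySem.Str.isIn term file_path) then 0
  else if ["fertilizer", "fert"].any (fun term => PySem.Str.isIn term file_path) then 1
  else if ["climate", "weather"].any (fun term => PySem.Str.isIn term file_path) then 2
  else if ["yield", "production"].any (fun term => PySem.Str.isIn term file_path) then 3
  else 0

-- ===== PORT B =====
def pvKeywordIds : List (String × Int) :=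
  [("crop_recommendation", 0), ("crop_recommend", 0),
   ("fertilizer", 1), ("fert", 1),
   ("climate", 2), ("weather", 2),
   ("yield", 3), ("production", 3)]

def infer_task_id_from_path_alt (file_path : String) : Int :=
  let p := PySem.Str.lower file_path
  let hits := (pvKeywordIds.filter (fun kv => PySem.Str.isIn kv.1 p)).map (fun kv => kv.2)
  (PySem.List.min? hits (fun x => x)).getD 0

-- ===== PRECONDITION & SPEC =====
def Spec_infer_task_id_from_path (file_path : String) (out : Int) : Prop := out = infer_task_id_from_path_alt file_path
instance (file_path : String) (out : Int) : Decidable (Spec_infer_task_id_from_path file_path out) := by unfold Spec_infer_task_id_from_path; infer_instance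

-- ===== CLAIM =====
def Claim_equal_infer_task_id_from_path : Prop := ∀ (file_path : String), Dom_infer_task_id_from_path file_path → Spec_infer_task_id_from_path file_path (infer_task_id_from_path file_path)

-- ===== LEMMAS AND PROOFS =====

-- ===== VERDICT =====
theorem infer_task_id_from_path_spec : Claim_equal_infer_task_id_from_path := by
  intro fp _
  unfold Spec_infer_task_id_from_path infer_task_id_from_path infer_task_id_from_path_alt pvKeywordIds
  simp only [List.any_cons, List.any_nil, List.filter_cons, List.filter_nil, Bool.or_false]

  generalize PySem.Str.isIn "crop_recommendation" (PySem.Str.lower fp) = b1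
  generalize PySem.Str.isIn "crop_recommend" (PySem.Str.lower fp) = b2
  generalize PySem.Str.isIn "fertilizer" (PySem.Str.lower fp) = b3
  generalize PySem.Str.isIn "fert" (PySem.Str.lower fp) = b4
  generalize PySem.Str.isIn "climate" (PySem.Str.lower fp) = b5
  generalize PySem.Str.isIn "weather" (PySem.Str.lower fp) = b6
  generalize PySem.Str.isIn "yield" (PySem.Str.lower fp) = b7
  generalize PySem.Str.isIn "production" (PySem.Str.lower fp) = b8
  revert b1 b2 b3 b4 b5 b6 b7 b8
  decide
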